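-- pv_equiv track=rewrite | github.com/firebase/firebase-ios-sdk | FirebasePerformance/ProtoSupport/proto_generator.py | nanopb_remove_extern_c
-- ===== SOURCE A (Python) =====
-- def nanopb_remove_extern_c(lines):
--   """Removes extern "C" directives from nanopb code.
--
--   Args:
--     lines: A nanobp-generated source file, split into lines.
--   Returns:
--     A list of strings, similar to the input but modified to remove extern "C".
--   """
--   result = []
--   state = 'initial'
--   for line in lines:
--     if state == 'initial':
--       if '#ifdef __cplusplus' in line:
--         state = 'in-ifdef'
--         continue
--
--       result.append(line)
--
--     elif state == 'in-ifdef':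
--       if '#endif' in line:
--         state = 'initial'
--
--   return result
-- ===== SOURCE B (Python) =====
-- def nanopb_remove_extern_c(lines):
--   """Removes extern "C" directives from nanopb code."""
--   result = []
--   it = iter(lines)
--   for line in it:
--     if '#ifdef __cplusplus' in line:
--       # drain from the same iterator until the closing #endif (dropped too)
--       for inner in it:
--         if '#endif' in inner:
--           break
--       continue
--     result.append(line)
--   return result
-- ===== Notes on version B (the rewrite author's own statement) =====
-- stated objective: simpler
-- what changed: Replaces the explicit state-machine variable with a nested loop that drains the shared iterator up to the matching #endif, so there is no state bookkeeping at all.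
import Mathlib
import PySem

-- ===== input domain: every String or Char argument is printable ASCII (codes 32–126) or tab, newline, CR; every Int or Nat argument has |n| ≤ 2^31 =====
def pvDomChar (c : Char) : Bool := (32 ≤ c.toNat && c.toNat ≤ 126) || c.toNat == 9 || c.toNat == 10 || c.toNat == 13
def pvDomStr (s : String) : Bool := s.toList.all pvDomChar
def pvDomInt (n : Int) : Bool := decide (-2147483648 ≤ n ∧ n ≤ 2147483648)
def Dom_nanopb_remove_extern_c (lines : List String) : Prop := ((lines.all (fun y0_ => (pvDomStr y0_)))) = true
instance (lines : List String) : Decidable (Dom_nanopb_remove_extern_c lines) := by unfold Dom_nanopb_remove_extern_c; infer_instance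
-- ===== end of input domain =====

-- B replaces A's explicit state variable with a nested draining loop over the same iterator (objective: simpler).
-- ===== PORT A =====
-- the 'for line in lines' loop of A, carrying state and result
def nanopbA_go (lines : List String) (state : String) (result : List String) : List String :=
  match lines with
  | [] => result
  | line :: rest =>
    if state = "initial" then
      if PySem.Str.isIn "#ifdef __cplusplus" line then
        nanopbA_go rest "in-ifdef" result
      else
        nanopbA_go rest state (result ++ [line])
    else if state = "in-ifdef" then
      if PySem.Str.isIn "#endif" line then
        nanopbA_go rest "initial" result
      else
        nanopbA_go rest state result
    else
      nanopbA_go rest state result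

def nanopb_remove_extern_c (lines : List String) : List String :=
  nanopbA_go lines "initial" []

-- ===== PORT B =====
-- the inner 'for inner in it' loop of B: consume until a line contains '#endif', return the rest of the iterator
def nanopbB_drain (lines : List String) : List String :=
  match lines with
  | [] => []
  | l :: rest => if PySem.Str.isIn "#endif" l then rest else nanopbB_drain rest

theorem nanopbB_drain_length_le (lines : List String) : (nanopbB_drain lines).length ≤ lines.length := by
  induction lines with
  | nil => simp [nanopbB_drain]
  | cons l rest ih =>
    simp only [nanopbB_drain]
    split
    · simp
    · exact Nat.le_succ_of_le ih

-- the outer 'for line in it' loop of B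
def nanopbB_go (lines : List String) : List String :=
  match lines with
  | [] => []
  | l :: rest =>
    if PySem.Str.isIn "#ifdef __cplusplus" l then
      nanopbB_go (nanopbB_drain rest)
    else
      l :: nanopbB_go rest
termination_by lines.length
decreasing_by
  · exact Nat.lt_succ_of_le (nanopbB_drain_length_le rest)
  · simp

def nanopb_remove_extern_c_alt (lines : List String) : List String :=
  nanopbB_go lines

-- ===== PRECONDITION & SPEC =====
def Spec_nanopb_remove_extern_c (lines : List String) (out : List String) : Prop := out = nanopb_remove_extern_c_alt lines
instance (lines : List String) (out : List String) : Decidable (Spec_nanopb_remove_extern_c lines out) := by unfold Spec_nanopb_remove_extern_c; infer_instance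

-- ===== CLAIM (what is proved, stated in full; the proofs are below) =====
def Claim_equal_nanopb_remove_extern_c : Prop := ∀ (lines : List String), Dom_nanopb_remove_extern_c lines → Spec_nanopb_remove_extern_c lines (nanopb_remove_extern_c lines)

-- ===== LEMMAS AND PROOFS =====

-- ===== VERDICT (by name: the statement is the Claim_ definition above) =====
-- A's 'in-ifdef' state skips exactly the lines B's inner loop drains
theorem nanopbA_go_in_ifdef (lines : List String) (result : List String) :
    nanopbA_go lines "in-ifdef" result = nanopbA_go (nanopbB_drain lines) "initial" result := by
  induction lines with
  | nil => simp [nanopbA_go, nanopbB_drain]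
  | cons l rest ih =>
    by_cases h : PySem.Str.isIn "#endif" l <;> simp at h <;>
      simp [nanopbA_go, nanopbB_drain, h, ih]

-- A's main loop in state 'initial' appends exactly what B's loop produces
theorem nanopbA_go_initial (lines : List String) :
    ∀ result : List String, nanopbA_go lines "initial" result = result ++ nanopbB_go lines := by
  induction lines using nanopbB_go.induct with
  | case1 => intro result; simp [nanopbA_go, nanopbB_go]
  | case2 l rest h ih =>
    intro result
    rw [nanopbB_go, if_pos h]
    simp at h
    simp [nanopbA_go, h, nanopbA_go_in_ifdef, ih]
  | case3 l rest h ih =>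
    intro result
    rw [nanopbB_go, if_neg h]
    simp at h
    simp [nanopbA_go, h, ih]

theorem nanopb_remove_extern_c_spec : Claim_equal_nanopb_remove_extern_c := by
  intro lines _
  unfold Spec_nanopb_remove_extern_c nanopb_remove_extern_c nanopb_remove_extern_c_alt
  simpa using nanopbA_go_initial lines []
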